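-- pv_equiv track=rewrite | github.com/Priivacy-ai/spec-kitty | src/specify_cli/template/asset_generator.py | _filter_frontmatter
-- ===== SOURCE A (Python) =====
-- def _filter_frontmatter(frontmatter_text: str) -> str:
--     filtered_lines: list[str] = []
--     skipping_block = False
--     for line in frontmatter_text.splitlines():
--         stripped = line.strip()
--         if skipping_block:
--             if line.startswith((" ", "\t")):
--                 continue
--             skipping_block = False
--         if stripped in {"scripts:", "agent_scripts:"}:
--             skipping_block = True
--             continue
--         filtered_lines.append(line)
--     return "\n".join(filtered_lines)
-- ===== SOURCE B (Python) =====
-- def _filter_frontmatter(frontmatter_text: str) -> str: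
--     lines = frontmatter_text.splitlines()
--     out: list[str] = []
--     i, n = 0, len(lines)
--     while i < n:
--         if lines[i].strip() in ("scripts:", "agent_scripts:"):
--             i += 1
--             while i < n and lines[i].startswith((" ", "\t")):
--                 i += 1
--         else:
--             out.append(lines[i])
--             i += 1
--     return "\n".join(out)
-- ===== Notes on version B (the rewrite author's own statement) =====
-- stated objective: alternative
-- what changed: Replaces A's single pass carrying a skipping_block boolean through every line with an index-based outer loop that matches header lines and an inner loop that consumes each whole indented block at once; no carried flag state.
import Mathlib
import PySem

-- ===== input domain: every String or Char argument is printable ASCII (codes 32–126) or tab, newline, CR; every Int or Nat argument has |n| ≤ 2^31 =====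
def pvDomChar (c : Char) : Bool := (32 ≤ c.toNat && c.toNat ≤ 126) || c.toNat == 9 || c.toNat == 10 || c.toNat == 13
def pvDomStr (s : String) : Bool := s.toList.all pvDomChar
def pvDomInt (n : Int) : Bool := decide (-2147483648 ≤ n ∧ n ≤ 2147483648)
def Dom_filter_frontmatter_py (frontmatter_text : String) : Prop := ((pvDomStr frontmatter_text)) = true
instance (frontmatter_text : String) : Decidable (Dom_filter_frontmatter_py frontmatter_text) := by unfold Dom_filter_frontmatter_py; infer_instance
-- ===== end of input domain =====

-- B replaces A's carried skipping-flag state machine by an outer header-match loop with an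
-- inner loop consuming each whole indented block (objective: alternative decomposition).

-- ===== PORT A =====
-- one step of A's for-loop, state = (filtered_lines, skipping_block); `continue` = return state
def ffStep (st : List String × Bool) (line : String) : List String × Bool :=
  let stripped := PySem.Str.strip line
  if st.2 then
    if PySem.Str.startswith line " " || PySem.Str.startswith line "\t" then st
    else -- skipping_block = False, fall through to the header check
      if stripped == "scripts:" || stripped == "agent_scripts:" then (st.1, true)
      else (st.1 ++ [line], false)
  else
    if stripped == "scripts:" || stripped == "agent_scripts:" then (st.1, true)
    else (st.1 ++ [line], false)

def filter_frontmatter_py (frontmatter_text : String) : String :=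
  PySem.Str.join "\n"
    ((PySem.Str.splitlines frontmatter_text).foldl ffStep ([], false)).1

-- ===== PORT B =====
-- inner `while i < n and lines[i].startswith((" ", "\t")): i += 1`: remaining lines after the block
def ffConsume : List String → List String
  | [] => []
  | l :: rest =>
    if PySem.Str.startswith l " " || PySem.Str.startswith l "\t" then ffConsume rest
    else l :: rest

theorem ffConsume_length_le (xs : List String) : (ffConsume xs).length ≤ xs.length := by
  induction xs with
  | nil => simp [ffConsume]
  | cons l rest ih =>
    simp only [ffConsume]
    split
    · exact Nat.le_succ_of_le ih
    · simp

-- outer `while i < n` loop over the remaining lines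
def ffGo : List String → List String
  | [] => []
  | l :: rest =>
    if PySem.Str.strip l == "scripts:" || PySem.Str.strip l == "agent_scripts:" then
      ffGo (ffConsume rest)
    else l :: ffGo rest
termination_by xs => xs.length
decreasing_by
  · exact Nat.lt_succ_of_le (ffConsume_length_le rest)
  · simp

def filter_frontmatter_py_alt (frontmatter_text : String) : String :=
  PySem.Str.join "\n" (ffGo (PySem.Str.splitlines frontmatter_text))

-- ===== PRECONDITION & SPEC =====
def Spec_filter_frontmatter_py (frontmatter_text : String) (out : String) : Prop := out = filter_frontmatter_py_alt frontmatter_text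
instance (frontmatter_text : String) (out : String) : Decidable (Spec_filter_frontmatter_py frontmatter_text out) := by unfold Spec_filter_frontmatter_py; infer_instance

-- ===== CLAIM (what is proved, stated in full; the proofs are below) =====
def Claim_equal_filter_frontmatter_py : Prop := ∀ (frontmatter_text : String), Dom_filter_frontmatter_py frontmatter_text → Spec_filter_frontmatter_py frontmatter_text (filter_frontmatter_py frontmatter_text)

-- ===== LEMMAS AND PROOFS =====

theorem bool_not_true {b : Bool} (h : b = false) : ¬ b = true := by
  simp only [h]; decide

theorem ffStep_true_indent (acc : List String) (l : String)
    (h : (PySem.Str.startswith l " " || PySem.Str.startswith l "\t") = true) :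
    ffStep (acc, true) l = (acc, true) := by
  simp only [ffStep]
  rw [if_pos h, if_pos trivial]

theorem ffStep_true_noindent (acc : List String) (l : String)
    (h : (PySem.Str.startswith l " " || PySem.Str.startswith l "\t") = false) :
    ffStep (acc, true) l = ffStep (acc, false) l := by
  simp only [ffStep]
  rw [if_neg (bool_not_true h), if_pos trivial, if_neg (by decide : ¬ (false = true))]

theorem ffStep_false_header (acc : List String) (l : String)
    (h : (PySem.Str.strip l == "scripts:" || PySem.Str.strip l == "agent_scripts:") = true) :
    ffStep (acc, false) l = (acc, true) := by
  simp only [ffStep]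
  rw [if_pos h, if_neg (by decide : ¬ (false = true))]

theorem ffStep_false_other (acc : List String) (l : String)
    (h : (PySem.Str.strip l == "scripts:" || PySem.Str.strip l == "agent_scripts:") = false) :
    ffStep (acc, false) l = (acc ++ [l], false) := by
  simp only [ffStep]
  rw [if_neg (bool_not_true h), if_neg (by decide : ¬ (false = true))]

-- running A's loop in skipping state = first dropping the indented block, then running non-skipping
theorem foldl_ffStep_true (ls : List String) (acc : List String) :
    (List.foldl ffStep (acc, true) ls).1 = (List.foldl ffStep (acc, false) (ffConsume ls)).1 := by
  induction ls with
  | nil => rfl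
  | cons l rest ih =>
    cases h : (PySem.Str.startswith l " " || PySem.Str.startswith l "\t") with
    | true =>
      rw [List.foldl_cons, ffStep_true_indent acc l h,
          show ffConsume (l :: rest) = ffConsume rest by simp only [ffConsume]; rw [if_pos h]]
      exact ih
    | false =>
      rw [List.foldl_cons, ffStep_true_noindent acc l h,
          show ffConsume (l :: rest) = l :: rest by
            simp only [ffConsume]; rw [if_neg (bool_not_true h)],
          List.foldl_cons]

-- A's non-skipping loop computes acc ++ B's outer loop (strong induction: ffGo recurses on ffConsume rest)
theorem foldl_ffStep_false (n : Nat) (ls : List String) (hn : ls.length ≤ n) (acc : List String) :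
    (List.foldl ffStep (acc, false) ls).1 = acc ++ ffGo ls := by
  induction n generalizing ls acc with
  | zero =>
    have : ls = [] := List.eq_nil_of_length_eq_zero (Nat.le_zero.mp hn)
    subst this; simp [ffGo]
  | succ n ih =>
    cases ls with
    | nil => simp [ffGo]
    | cons l rest =>
      cases h : (PySem.Str.strip l == "scripts:" || PySem.Str.strip l == "agent_scripts:") with
      | true =>
        have hlen : (ffConsume rest).length ≤ n :=
          le_trans (ffConsume_length_le rest) (Nat.lt_succ_iff.mp hn)
        rw [List.foldl_cons, ffStep_false_header acc l h,
            show ffGo (l :: rest) = ffGo (ffConsume rest) by rw [ffGo]; rw [if_pos h],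
            foldl_ffStep_true rest acc]
        exact ih _ hlen acc
      | false =>
        have hlen : rest.length ≤ n := Nat.lt_succ_iff.mp hn
        rw [List.foldl_cons, ffStep_false_other acc l h,
            show ffGo (l :: rest) = l :: ffGo rest by
              rw [ffGo]; rw [if_neg (bool_not_true h)],
            ih rest hlen (acc ++ [l])]
        simp

-- ===== VERDICT (by name: the statement is the Claim_ definition above) =====
theorem filter_frontmatter_py_spec : Claim_equal_filter_frontmatter_py := by
  intro t _
  unfold Spec_filter_frontmatter_py filter_frontmatter_py filter_frontmatter_py_alt
  rw [foldl_ffStep_false (PySem.Str.splitlines t).length _ le_rfl []]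
  simp
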